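-- pv_equiv track=rewrite | github.com/MeggieRong/refundWarehouseBusinessRecurrence | origScript/b2bNormal.py | countOrder
-- ===== SOURCE A (Python) =====
-- def countOrder(arr):
--     orderCount =  0
--     countTemp = {}
--     for d in arr:
--         for k, v in d.items():
--             countTemp.setdefault(k, set()).add(v)
--             if 'order_no' in countTemp.keys():
--                 orderCount = (len(countTemp['order_no']))
--     return  orderCount
-- ===== SOURCE B (Python) =====
-- def countOrder(arr):
--     # sort the order_no values, then count runs of equal adjacent values
--     vals = sorted(v for d in arr for k, v in d.items() if k == 'order_no')
--     if not vals:
--         return 0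
--     count = 1
--     for prev, cur in zip(vals, vals[1:]):
--         if cur != prev:
--             count += 1
--     return count
-- ===== Notes on version B (the rewrite author's own statement) =====
-- stated objective: alternative
-- what changed: B replaces A's dict-of-sets (hash dedup with a per-pair membership test and recount of the order_no set) by a sort-then-scan distinct count: it extracts the order_no values, sorts them, and counts boundaries between runs of equal adjacent values.
import Mathlib
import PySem

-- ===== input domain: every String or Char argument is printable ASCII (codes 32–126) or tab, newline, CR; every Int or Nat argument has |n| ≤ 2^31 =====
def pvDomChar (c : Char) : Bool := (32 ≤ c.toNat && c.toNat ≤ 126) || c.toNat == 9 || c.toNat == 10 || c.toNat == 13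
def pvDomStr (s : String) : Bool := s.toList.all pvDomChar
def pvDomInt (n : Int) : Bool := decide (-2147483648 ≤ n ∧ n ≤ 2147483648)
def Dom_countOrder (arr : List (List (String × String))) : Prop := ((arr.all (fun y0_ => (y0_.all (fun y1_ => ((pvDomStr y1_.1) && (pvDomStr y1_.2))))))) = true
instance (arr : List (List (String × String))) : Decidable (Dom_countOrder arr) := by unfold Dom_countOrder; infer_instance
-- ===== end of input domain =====

-- B replaces A's dict-of-sets dedup (with a per-pair membership test and recount) by a
-- sort-then-scan distinct count of the order_no values; same return value.

-- ===== PORT A =====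
-- inner loop body of A: countTemp.setdefault(k, set()).add(v); if 'order_no' in countTemp: orderCount = len(countTemp['order_no'])
def innerA (st : Int × PySem.Dict String (PySem.Set String)) (kv : String × String) :
    Int × PySem.Dict String (PySem.Set String) :=
  let ct := st.2.modify kv.1 PySem.Set.empty (fun s => PySem.Set.add s kv.2)
  let oc := if ct.contains "order_no"
            then (PySem.Set.len (ct.getD "order_no" PySem.Set.empty) : Int)
            else st.1
  (oc, ct)

def countOrder (arr : List (List (String × String))) : Int :=
  (arr.foldl (fun st d => d.foldl innerA st) ((0 : Int), PySem.Dict.empty)).1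

-- ===== PORT B =====
-- vals = sorted(v for d in arr for k, v in d.items() if k == 'order_no')
def orderVals (arr : List (List (String × String))) : List String :=
  PySem.List.sorted
    (arr.flatMap (fun d => (d.filter (fun kv => kv.1 == "order_no")).map Prod.snd))
    (fun x => x) false

-- if not vals: return 0; count = 1; for prev, cur in zip(vals, vals[1:]): if cur != prev: count += 1
def countOrder_alt (arr : List (List (String × String))) : Int :=
  let vals := orderVals arr
  match vals with
  | [] => 0
  | _ :: _ =>
    (vals.zip vals.tail).foldl
      (fun count pc => if pc.2 ≠ pc.1 then count + 1 else count) 1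

-- ===== PRECONDITION & SPEC =====
def Spec_countOrder (arr : List (List (String × String))) (out : Int) : Prop := out = countOrder_alt arr
instance (arr : List (List (String × String))) (out : Int) : Decidable (Spec_countOrder arr out) := by unfold Spec_countOrder; infer_instance

-- ===== CLAIM (what is proved, stated in full; the proofs are below) =====
def Claim_equal_countOrder : Prop := ∀ (arr : List (List (String × String))), Dom_countOrder arr → Spec_countOrder arr (countOrder arr)

-- ===== LEMMAS AND PROOFS =====

-- the set-fold that A's order_no entry performs
def addB (seen : PySem.Set String) (kv : String × String) : PySem.Set String :=
  if kv.1 == "order_no" then PySem.Set.add seen kv.2 else seen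

-- invariant through one dict's items: the dict's order_no set is `seen`, and orderCount is its size
lemma inner_inv (d : List (String × String)) (oc : Int)
    (ct : PySem.Dict String (PySem.Set String)) (seen : PySem.Set String)
    (h1 : ct.getD "order_no" PySem.Set.empty = seen)
    (h2 : oc = (PySem.Set.len seen : Int)) :
    (d.foldl innerA (oc, ct)).2.getD "order_no" PySem.Set.empty = d.foldl addB seen
    ∧ (d.foldl innerA (oc, ct)).1 = (PySem.Set.len (d.foldl addB seen) : Int) := by
  induction d generalizing oc ct seen with
  | nil => exact ⟨h1, h2⟩
  | cons kv rest ih =>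
    have h1' : ct.getD "order_no" ([] : PySem.Set String) = seen := h1
    simp only [List.foldl_cons]
    by_cases hk : kv.1 = "order_no"
    · have hget : (innerA (oc, ct) kv).2.getD "order_no" PySem.Set.empty
          = PySem.Set.add seen kv.2 := by
        simp [innerA, hk, PySem.Dict.getD_modify_self, h1']
      have hoc : (innerA (oc, ct) kv).1 = (PySem.Set.len (PySem.Set.add seen kv.2) : Int) := by
        simp [innerA, hk, PySem.Dict.contains_modify, PySem.Dict.getD_modify_self, h1',
          PySem.Set.len]
      have hb : addB seen kv = PySem.Set.add seen kv.2 := by simp [addB, hk]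
      rw [hb]
      exact ih _ _ _ hget hoc
    · have hne : ("order_no" : String) ≠ kv.1 := Ne.symm hk
      have hget : (innerA (oc, ct) kv).2.getD "order_no" PySem.Set.empty = seen := by
        simp only [innerA]
        rw [PySem.Dict.getD_modify_of_ne ct _ _ hne]
        exact h1
      have hoc : (innerA (oc, ct) kv).1 = (PySem.Set.len seen : Int) := by
        simp only [innerA]
        split_ifs with hcont
        · rw [PySem.Dict.getD_modify_of_ne ct _ _ hne, h1]
        · exact h2
      have hb : addB seen kv = seen := by simp [addB, hk]
      rw [hb]
      exact ih _ _ _ hget hoc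

-- the same invariant through the outer loop over arr
lemma outer_inv (arr : List (List (String × String))) (oc : Int)
    (ct : PySem.Dict String (PySem.Set String)) (seen : PySem.Set String)
    (h1 : ct.getD "order_no" PySem.Set.empty = seen)
    (h2 : oc = (PySem.Set.len seen : Int)) :
    (arr.foldl (fun st d => d.foldl innerA st) (oc, ct)).1
      = (PySem.Set.len (arr.foldl (fun s d => d.foldl addB s) seen) : Int) := by
  induction arr generalizing oc ct seen with
  | nil => exact h2
  | cons d rest ih =>
    simp only [List.foldl_cons]
    obtain ⟨g1, g2⟩ := inner_inv d oc ct seen h1 h2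
    have := ih (d.foldl innerA (oc, ct)).1 (d.foldl innerA (oc, ct)).2 (d.foldl addB seen) g1 g2
    simpa using this

-- the addB-fold over one dict is the Set.add-fold over that dict's filtered order_no values
lemma addB_eq_filter (d : List (String × String)) (seen : PySem.Set String) :
    d.foldl addB seen
      = ((d.filter (fun kv => kv.1 == "order_no")).map Prod.snd).foldl PySem.Set.add seen := by
  induction d generalizing seen with
  | nil => rfl
  | cons kv rest ih =>
    by_cases hk : kv.1 = "order_no"
    · simp [addB, hk, ih]
    · simp [addB, hk, ih]

-- flattening the two loops: A's order_no set is the Set.add-fold over all extracted values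
lemma fold_flat (arr : List (List (String × String))) (seen : PySem.Set String) :
    arr.foldl (fun s d => d.foldl addB s) seen
      = (arr.flatMap (fun d => (d.filter (fun kv => kv.1 == "order_no")).map Prod.snd)).foldl
          PySem.Set.add seen := by
  induction arr generalizing seen with
  | nil => rfl
  | cons d rest ih =>
    simp only [List.foldl_cons, List.flatMap_cons, List.foldl_append]
    rw [addB_eq_filter, ih]

-- the size of set(vs) is the number of distinct elements of vs
lemma setLen_eq_card (vs : List String) :
    PySem.Set.len (PySem.Set.ofList vs) = vs.toFinset.card := by
  have hfin : (PySem.Set.ofList vs).toFinset = vs.toFinset := by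
    ext x; simp [List.mem_toFinset, PySem.Set.mem_ofList]
  have := List.toFinset_card_of_nodup (PySem.Set.nodup_ofList vs)
  rw [hfin] at this
  simpa [PySem.Set.len] using this.symm

-- on a ≤-sorted nonempty list, 1 + (number of unequal adjacent pairs) = number of distinct elements
lemma adj_count_sorted (a : String) (t : List String)
    (h : (a :: t).Pairwise (· ≤ ·)) :
    1 + ((a :: t).zip t).countP (fun pc => decide (pc.2 ≠ pc.1))
      = (a :: t).toFinset.card := by
  induction t generalizing a with
  | nil => simp
  | cons b t' ih =>
    have hbt : (b :: t').Pairwise (· ≤ ·) := h.tail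
    have hab : a ≤ b := (List.pairwise_cons.mp h).1 b (by simp)
    have hzip : ((a :: b :: t').zip (b :: t')) = (a, b) :: ((b :: t').zip t') := rfl
    have hcons : ((a, b) :: ((b :: t').zip t')).countP (fun pc => decide (pc.2 ≠ pc.1))
        = ((b :: t').zip t').countP (fun pc => decide (pc.2 ≠ pc.1))
          + (if b ≠ a then 1 else 0) := by
      simp [List.countP_cons]
    by_cases hEq : a = b
    · have hmem : a ∈ List.toFinset (b :: t') := by
        rw [List.mem_toFinset]; exact hEq ▸ List.mem_cons_self
      have hins : (a :: b :: t').toFinset = (b :: t').toFinset := by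
        rw [List.toFinset_cons]; exact Finset.insert_eq_self.mpr hmem
      rw [hzip, hins, hcons, ← ih b hbt]
      simp [hEq]
    · have hnm : a ∉ List.toFinset (b :: t') := by
        simp only [List.mem_toFinset, List.mem_cons]
        rintro (hm | hm)
        · exact hEq hm
        · exact hEq (le_antisymm hab ((List.pairwise_cons.mp hbt).1 a hm))
      have hins : (a :: b :: t').toFinset.card = (b :: t').toFinset.card + 1 := by
        simp only [List.toFinset_cons]
        rw [Finset.card_insert_of_notMem (by simpa using hnm)]
      rw [hzip, hins, hcons, ← ih b hbt]
      simp [Ne.symm hEq]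
      omega

-- ===== VERDICT (by name: the statement is the Claim_ definition above) =====
theorem countOrder_spec : Claim_equal_countOrder := by
  intro arr _
  unfold Spec_countOrder countOrder countOrder_alt
  set vs := arr.flatMap (fun d => (d.filter (fun kv => kv.1 == "order_no")).map Prod.snd) with hvs
  -- A's result is the size of set(vs)
  have hA : (arr.foldl (fun st d => d.foldl innerA st) ((0 : Int), PySem.Dict.empty)).1
      = (PySem.Set.len (PySem.Set.ofList vs) : Int) := by
    rw [outer_inv arr 0 PySem.Dict.empty PySem.Set.empty (by simp)
        (by simp [PySem.Set.len, PySem.Set.empty]),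
      fold_flat, PySem.Set.ofList_eq_foldl]
    rfl
  rw [hA]
  -- B's result: scan of the sorted values
  have hperm : (orderVals arr).Perm vs := PySem.List.sorted_perm vs (fun x => x) false
  have hpair : (orderVals arr).Pairwise (· ≤ ·) := PySem.List.sorted_pairwise vs (fun x => x)
  have hfin : (orderVals arr).toFinset = vs.toFinset :=
    List.toFinset_eq_of_perm _ _ hperm
  rcases hw : orderVals arr with _ | ⟨a, t⟩
  · -- vals = []: vs = [] as well, both sides are 0
    have : vs = [] := by
      have := hperm; rw [hw] at this; exact (List.Perm.nil_eq this).symm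
    simp [this, PySem.Set.len]
  · rw [hw] at hpair hfin
    show (PySem.Set.ofList vs).len
        = List.foldl (fun count pc => if pc.2 ≠ pc.1 then count + 1 else count) 1 ((a :: t).zip t)
    have hcnt := adj_count_sorted a t hpair
    rw [hfin] at hcnt
    have hfold := PySem.List.foldl_count_if (fun pc : String × String => decide (pc.2 ≠ pc.1))
      ((a :: t).zip t) 1
    simp only [decide_eq_true_eq] at hfold
    rw [hfold, setLen_eq_card, ← hcnt]
    push_cast
    ring
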